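-- pv_equiv track=rewrite | github.com/Qazaqbala-N/last | ICTpython/task 4/Postal Codes.py | check
-- ===== SOURCE A (Python) =====
-- def check(s):
--     if len(s) != 6: return False
--     ind = 1
--     for i in s:
--         if ind % 2 == 1 and ('A' <= i <= 'Z') == False:
--             return False
--         elif ind % 2 == 0 and ('0' <= i <= '9') == False:
--             return False
--         ind += 1
--     return True
-- ===== SOURCE B (Python) =====
-- def check(s):
--     if len(s) != 6:
--         return False
--     return all('A' <= c <= 'Z' for c in s[0::2]) and all('0' <= c <= '9' for c in s[1::2])
-- ===== Notes on version B (the rewrite author's own statement) =====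
-- stated objective: simpler
-- what changed: Replaces the indexed loop with early returns and manual parity counter by a length guard plus two all() checks over the even-index and odd-index slices.
import Mathlib
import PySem

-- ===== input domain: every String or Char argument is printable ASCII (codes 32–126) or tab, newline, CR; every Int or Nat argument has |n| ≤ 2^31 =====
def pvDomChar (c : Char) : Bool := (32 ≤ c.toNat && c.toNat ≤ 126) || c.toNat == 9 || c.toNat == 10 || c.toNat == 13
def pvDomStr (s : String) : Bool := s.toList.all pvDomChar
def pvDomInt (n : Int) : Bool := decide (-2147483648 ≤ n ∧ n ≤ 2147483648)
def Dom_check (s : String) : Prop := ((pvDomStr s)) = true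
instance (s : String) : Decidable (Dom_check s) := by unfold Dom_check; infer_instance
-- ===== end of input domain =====

-- B replaces A's counter loop with a length guard plus two all() checks over the even/odd slices (objective: simpler).

-- ===== PORT A =====
-- the for-loop over s with the counter ind (starting at 1) and its two early returns
def checkLoop : List Char → Nat → Bool
  | [], _ => true
  | c :: rest, ind =>
    if ind % 2 == 1 && !(decide ('A' ≤ c) && decide (c ≤ 'Z')) then false
    else if ind % 2 == 0 && !(decide ('0' ≤ c) && decide (c ≤ '9')) then false
    else checkLoop rest (ind + 1)

def check (s : String) : Bool :=
  if PySem.Str.len s ≠ 6 then false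
  else checkLoop s.toList 1

-- ===== PORT B =====
-- exact hand port of the step-2 slice xs[0::2] (start 0, step 2)
def everyOther : List Char → List Char
  | [] => []
  | [c] => [c]
  | c :: _ :: rest => c :: everyOther rest

def check_alt (s : String) : Bool :=
  if PySem.Str.len s ≠ 6 then false
  else (everyOther s.toList).all (fun c => decide ('A' ≤ c) && decide (c ≤ 'Z'))
       && (everyOther s.toList.tail).all (fun c => decide ('0' ≤ c) && decide (c ≤ '9'))

-- ===== PRECONDITION & SPEC =====
def Spec_check (s : String) (out : Bool) : Prop := out = check_alt s
instance (s : String) (out : Bool) : Decidable (Spec_check s out) := by unfold Spec_check; infer_instance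

-- ===== CLAIM (what is proved, stated in full; the proofs are below) =====
def Claim_equal_check : Prop := ∀ (s : String), Dom_check s → Spec_check s (check s)

-- ===== LEMMAS AND PROOFS =====

theorem checkLoop_parity (l : List Char) (i : Nat) : checkLoop l (i + 2) = checkLoop l i := by
  induction l generalizing i with
  | nil => rfl
  | cons c rest ih =>
      simp only [checkLoop, Nat.add_mod_right]
      rw [show i + 2 + 1 = i + 1 + 2 from by omega, ih]

theorem everyOther_cons (d : Char) (rest : List Char) :
    everyOther (d :: rest) = d :: everyOther rest.tail := by
  cases rest <;> rfl

theorem checkLoop_eq : ∀ l : List Char,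
    checkLoop l 1 =
      ((everyOther l).all (fun c => decide ('A' ≤ c) && decide (c ≤ 'Z'))
        && (everyOther l.tail).all (fun c => decide ('0' ≤ c) && decide (c ≤ '9')))
  | [] => by rfl
  | [c] => by
      by_cases h1 : 'A' ≤ c <;> by_cases h2 : c ≤ 'Z' <;>
        simp_all [checkLoop, everyOther, not_le]
  | c :: d :: rest => by
      have ih := checkLoop_eq rest
      simp only [checkLoop, everyOther, List.tail, List.all_cons, everyOther_cons]
      rw [show (1 : Nat) + 1 + 1 = 1 + 2 from rfl, checkLoop_parity, ih]
      cases hA : decide ('A' ≤ c) && decide (c ≤ 'Z') <;>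
        cases hD : decide ('0' ≤ d) && decide (d ≤ '9') <;>
          simp_all
      cases rest <;> simp

-- ===== VERDICT (by name: the statement is the Claim_ definition above) =====
theorem check_spec : Claim_equal_check := by
  intro s _
  unfold Spec_check check check_alt
  split
  · rfl
  · exact checkLoop_eq s.toList
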